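-- pv_equiv track=rewrite | github.com/BackendSquid/AlgorithmChallenge | 신고결과받기/pyro.py | solution
-- ===== SOURCE A (Python) =====
-- from collections import defaultdict
--
-- def solution(id_list, report, k):
--     reporter_dict = defaultdict(list)
--     reportee_count = defaultdict(int)
--     for r in set(report):
--         [reporter, reportee] = r.split(" ")
--         reporter_dict[reporter].append(reportee)
--         reportee_count[reportee] += 1
--
--     answer = []
--     for reporter in id_list:
--         mail_count = sum(reportee_count[reportee] >= k \
--                          for reportee in reporter_dict[reporter])
--         answer.append(mail_count)
--     return answer
-- ===== SOURCE B (Python) =====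
-- def solution(id_list, report, k):
--     distinct = set(report)
--     cnt = {}
--     for r in distinct:
--         reporter, reportee = r.split(" ")
--         cnt[reportee] = cnt.get(reportee, 0) + 1
--     banned = {e for e, c in cnt.items() if c >= k}
--     mail = {}
--     for r in distinct:
--         reporter, reportee = r.split(" ")
--         if reportee in banned:
--             mail[reporter] = mail.get(reporter, 0) + 1
--     return [mail.get(i, 0) for i in id_list]
-- ===== Notes on version B (the rewrite author's own statement) =====
-- stated objective: simpler
-- what changed: B never builds per-reporter reportee lists: it tallies distinct reports per reportee, forms the banned set, then counts mails per reporter in a single report-driven pass, finally reading the mail counter for each id (absent ids get 0).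
import Mathlib
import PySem

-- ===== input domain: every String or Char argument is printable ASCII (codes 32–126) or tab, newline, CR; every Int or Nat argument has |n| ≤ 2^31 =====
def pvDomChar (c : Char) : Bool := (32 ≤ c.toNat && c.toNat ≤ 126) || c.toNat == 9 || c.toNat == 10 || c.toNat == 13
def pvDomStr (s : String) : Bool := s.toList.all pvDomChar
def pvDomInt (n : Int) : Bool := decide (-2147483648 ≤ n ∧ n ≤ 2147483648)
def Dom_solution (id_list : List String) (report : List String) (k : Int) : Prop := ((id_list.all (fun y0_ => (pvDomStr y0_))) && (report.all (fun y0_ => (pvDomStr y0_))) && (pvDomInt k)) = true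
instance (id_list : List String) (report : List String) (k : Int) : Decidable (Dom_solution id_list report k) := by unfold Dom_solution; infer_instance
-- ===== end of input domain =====

-- B replaces A's per-reporter reportee lists by a banned set plus one report-driven mail counter; equal return values on Pre_.


-- ===== PORT A =====
-- for r in set(report): [reporter, reportee] = r.split(" "); group reportees per reporter, count reports per reportee;
-- then for each id sum the threshold tests over its reportee list.  The '_ => st' branch is where Python raises
-- ValueError on unpacking (excluded by Pre_solution); the set's iteration order cannot affect the result.
def solution (id_list : List String) (report : List String) (k : Int) : List Int :=
  let st :=
    (PySem.Set.ofList report).foldl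
      (fun (st : PySem.Dict String (List String) × PySem.Dict String Int) r =>
        match PySem.Str.split? r " " with
        | some [reporter, reportee] =>
            (st.1.modify reporter [] (fun l => l ++ [reportee]),
             st.2.modify reportee 0 (fun c => c + 1))
        | _ => st)
      (PySem.Dict.empty, PySem.Dict.empty)
  id_list.foldl
    (fun answer reporter =>
      answer ++
        [(st.1.getD reporter []).foldl
           (fun acc reportee => acc + (if st.2.getD reportee 0 ≥ k then (1 : Int) else 0)) 0])
    []

-- ===== PORT B =====
-- tally distinct reports per reportee, form the banned set, then one report-driven pass counting mails per reporter;
-- finally read the mail counter for each id (absent ids give 0).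
def solution_alt (id_list : List String) (report : List String) (k : Int) : List Int :=
  let distinct := PySem.Set.ofList report
  let cnt :=
    distinct.foldl
      (fun (cnt : PySem.Dict String Int) r =>
        -- reporter, reportee = r.split(" "): the arity check is explicit; split? is `some` since sep ≠ ""
        let parts := (PySem.Str.split? r " ").getD []
        if parts.length == 2 then
          cnt.insert (parts.getD 1 "") (cnt.getD (parts.getD 1 "") 0 + 1)
        else cnt)   -- Python raises ValueError here (outside Pre_solution)
      PySem.Dict.empty
  let banned : PySem.Set String :=
    PySem.Set.ofList ((cnt.items.filter (fun p => p.2 ≥ k)).map (fun p => p.1))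
  let mail :=
    distinct.foldl
      (fun (mail : PySem.Dict String Int) r =>
        let parts := (PySem.Str.split? r " ").getD []
        if parts.length == 2 then
          if PySem.Set.contains banned (parts.getD 1 "") then
            mail.insert (parts.getD 0 "") (mail.getD (parts.getD 0 "") 0 + 1)
          else mail
        else mail)
      PySem.Dict.empty
  id_list.map (fun i => mail.getD i 0)

-- ===== PRECONDITION & SPEC =====
-- Pre_ excludes exactly the report entries that do not split into two space-separated fields: there Python A
-- (and B alike) raises ValueError on unpacking.
def Pre_solution (id_list : List String) (report : List String) (k : Int) : Prop :=
  ∀ r ∈ report, ((PySem.Str.split? r " ").getD []).length = 2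
instance (id_list : List String) (report : List String) (k : Int) : Decidable (Pre_solution id_list report k) := by unfold Pre_solution; infer_instance

def pvWitness_solution : List String × List String × Int :=
  (["muzi", "frodo", "apeach", "neo"],
   ["muzi frodo", "apeach frodo", "frodo neo", "muzi neo", "apeach muzi"], 2)

def Spec_solution (id_list : List String) (report : List String) (k : Int) (out : List Int) : Prop := out = solution_alt id_list report k
instance (id_list : List String) (report : List String) (k : Int) (out : List Int) : Decidable (Spec_solution id_list report k out) := by unfold Spec_solution; infer_instance

-- ===== CLAIM (what is proved, stated in full; the proofs are below) =====
def Claim_equal_solution : Prop := ∀ (id_list : List String) (report : List String) (k : Int), Dom_solution id_list report k → Pre_solution id_list report k → Spec_solution id_list report k (solution id_list report k)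

-- ===== LEMMAS AND PROOFS =====

-- the (reporter, reportee) pair of a well-formed report line
def pvPair (r : String) : String × String :=
  match PySem.Str.split? r " " with
  | some [a, b] => (a, b)
  | _ => ("", "")

theorem pvMatch_eq {α : Type} (r : String) (h : ((PySem.Str.split? r " ").getD []).length = 2)
    (f : String → String → α) (d : α) :
    (match PySem.Str.split? r " " with | some [a, b] => f a b | _ => d)
      = f (pvPair r).1 (pvPair r).2 := by
  unfold pvPair
  rcases hs : PySem.Str.split? r " " with _ | ⟨_ | ⟨a, _ | ⟨b, _ | ⟨c, t⟩⟩⟩⟩ <;>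
    rw [hs] at h <;> simp at h ⊢

theorem pvMatchL_eq {α : Type} (r : String) (h : ((PySem.Str.split? r " ").getD []).length = 2)
    (f : String → String → α) (d : α) :
    (if ((PySem.Str.split? r " ").getD []).length == 2 then
        f (((PySem.Str.split? r " ").getD []).getD 0 "") (((PySem.Str.split? r " ").getD []).getD 1 "")
      else d)
      = f (pvPair r).1 (pvPair r).2 := by
  unfold pvPair
  rcases hs : PySem.Str.split? r " " with _ | ⟨_ | ⟨a, _ | ⟨b, _ | ⟨c, t⟩⟩⟩⟩ <;>
    rw [hs] at h <;> simp at h ⊢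

-- B's counter lookup is a count over the pair list
theorem pvCnt_eq (P : List (String × String)) (e : String) :
    (P.foldl (fun (d : PySem.Dict String Int) p => d.insert p.2 (d.getD p.2 0 + 1)) PySem.Dict.empty).getD e 0
      = ((P.map (fun p => p.2)).count e : Int) := by
  rw [← List.foldl_map (f := fun p : String × String => p.2)
        (g := fun (d : PySem.Dict String Int) e => d.insert e (d.getD e 0 + 1)),
      PySem.Dict.getD_foldl_insert_add_one]
  simp

-- A's counter lookup is the same count
theorem pvRc_eq (P : List (String × String)) (e : String) :
    (P.foldl (fun (d : PySem.Dict String Int) p => d.modify p.2 0 (fun c => c + 1)) PySem.Dict.empty).getD e 0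
      = ((P.map (fun p => p.2)).count e : Int) := by
  rw [← List.foldl_map (f := fun p : String × String => p.2)
        (g := fun (d : PySem.Dict String Int) e => d.modify e 0 (fun c => c + 1)),
      PySem.Dict.getD_foldl_modify_add_one]
  simp

-- membership in B's banned set is exactly the threshold test, for reportees that occur in P
theorem pvBanned_eq (P : List (String × String)) (k : Int) (e : String)
    (he : e ∈ P.map (fun p => p.2)) :
    (PySem.Set.contains
      (PySem.Set.ofList
        ((((P.foldl (fun (d : PySem.Dict String Int) p => d.insert p.2 (d.getD p.2 0 + 1)) PySem.Dict.empty).items.filter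
            (fun p => p.2 ≥ k)).map (fun p => p.1)))) e)
      = decide (k ≤ ((P.map (fun p => p.2)).count e : Int)) := by
  set cnt := P.foldl (fun (d : PySem.Dict String Int) p => d.insert p.2 (d.getD p.2 0 + 1)) PySem.Dict.empty with hcnt
  have hnd : cnt.keys.Nodup := by
    rw [hcnt]
    exact PySem.Dict.nodup_keys_foldl_insert_key P (fun p => p.2) _ _ (by simp)
  have hkeys : cnt.keys = PySem.Set.ofList (P.map (fun p => p.2)) := by
    rw [hcnt, PySem.Dict.keys_foldl_insert_key]
    rfl
  have hek : e ∈ cnt.keys := by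
    rw [hkeys]; exact (PySem.Set.mem_ofList _ _).mpr he
  have hgd : cnt.getD e 0 = ((P.map (fun p => p.2)).count e : Int) := pvCnt_eq P e
  rw [PySem.Dict.items_eq_map_keys cnt hnd (0 : Int), List.filter_map, List.map_map]
  have hmem : e ∈ ((cnt.keys.filter (fun x => ((fun p : String × Int => p.2 ≥ k) ∘ fun x => (x, cnt.getD x 0)) x)).map
      (fun x => ((fun p : String × Int => p.1) ∘ fun x => (x, cnt.getD x 0)) x)) ↔ k ≤ cnt.getD e 0 := by
    simp [List.mem_filter, hek]
  rw [← hgd]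
  by_cases h : k ≤ cnt.getD e 0
  · simp only [decide_eq_true h]
    have : e ∈ PySem.Set.ofList _ := (PySem.Set.mem_ofList _ _).mpr (hmem.mpr h)
    simpa [PySem.Set.contains] using this
  · simp only [decide_eq_false h]
    have : e ∉ PySem.Set.ofList _ := fun hc => h (hmem.mp ((PySem.Set.mem_ofList _ _).mp hc))
    simpa [PySem.Set.contains] using this

-- ===== VERDICT (by name: the statement is the Claim_ definition above) =====
theorem solution_spec : Claim_equal_solution := by
  intro id_list report k _ hpre
  unfold Spec_solution
  have hS : ∀ r ∈ PySem.Set.ofList report, ((PySem.Str.split? r " ").getD []).length = 2 :=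
    fun r hr => hpre r ((PySem.Set.mem_ofList _ _).mp hr)
  simp only [solution, solution_alt]
  rw [PySem.List.foldl_congr_mem (PySem.Set.ofList report)
        (fun (st : PySem.Dict String (List String) × PySem.Dict String Int) r =>
          match PySem.Str.split? r " " with
          | some [reporter, reportee] =>
              (st.1.modify reporter [] (fun l => l ++ [reportee]),
               st.2.modify reportee 0 (fun c => c + 1))
          | _ => st)
        (fun st r =>
          (st.1.modify (pvPair r).1 [] (fun l => l ++ [(pvPair r).2]),
           st.2.modify (pvPair r).2 0 (fun c => c + 1)))
        (PySem.Dict.empty, PySem.Dict.empty)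
        (fun acc r hr => pvMatch_eq r (hS r hr) _ _)]
  rw [PySem.List.foldl_congr_mem (PySem.Set.ofList report)
        (fun (cnt : PySem.Dict String Int) r =>
          if ((PySem.Str.split? r " ").getD []).length == 2 then
            cnt.insert (((PySem.Str.split? r " ").getD []).getD 1 "")
              (cnt.getD (((PySem.Str.split? r " ").getD []).getD 1 "") 0 + 1)
          else cnt)
        (fun cnt r => cnt.insert (pvPair r).2 (cnt.getD (pvPair r).2 0 + 1))
        PySem.Dict.empty
        (fun acc r hr => pvMatchL_eq r (hS r hr)
          (fun _a b => acc.insert b (acc.getD b 0 + 1)) acc)]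
  rw [← List.foldl_map (f := pvPair)
        (g := fun (st : PySem.Dict String (List String) × PySem.Dict String Int) p =>
          (st.1.modify p.1 [] (fun l => l ++ [p.2]), st.2.modify p.2 0 (fun c => c + 1))),
      ← List.foldl_map (f := pvPair)
        (g := fun (cnt : PySem.Dict String Int) p => cnt.insert p.2 (cnt.getD p.2 0 + 1))]
  set P := (PySem.Set.ofList report).map pvPair with hP
  set C := P.foldl (fun (cnt : PySem.Dict String Int) p => cnt.insert p.2 (cnt.getD p.2 0 + 1)) PySem.Dict.empty with hC
  set B := PySem.Set.ofList ((C.items.filter (fun p => p.2 ≥ k)).map (fun p => p.1)) with hB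
  rw [PySem.List.foldl_congr_mem (PySem.Set.ofList report)
        (fun (mail : PySem.Dict String Int) r =>
          if ((PySem.Str.split? r " ").getD []).length == 2 then
            if PySem.Set.contains B (((PySem.Str.split? r " ").getD []).getD 1 "") then
              mail.insert (((PySem.Str.split? r " ").getD []).getD 0 "")
                (mail.getD (((PySem.Str.split? r " ").getD []).getD 0 "") 0 + 1)
            else mail
          else mail)
        (fun mail r =>
          if PySem.Set.contains B (pvPair r).2 then
            mail.insert (pvPair r).1 (mail.getD (pvPair r).1 0 + 1)
          else mail)
        PySem.Dict.empty
        (fun acc r hr => pvMatchL_eq r (hS r hr)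
          (fun a b => if PySem.Set.contains B b then acc.insert a (acc.getD a 0 + 1) else acc) acc)]
  rw [← List.foldl_map (f := pvPair)
        (g := fun (mail : PySem.Dict String Int) p =>
          if PySem.Set.contains B p.2 then mail.insert p.1 (mail.getD p.1 0 + 1) else mail),
      ← hP]
  have hprod : P.foldl
        (fun (st : PySem.Dict String (List String) × PySem.Dict String Int) p =>
          (st.1.modify p.1 [] (fun l => l ++ [p.2]), st.2.modify p.2 0 (fun c => c + 1)))
        (PySem.Dict.empty, PySem.Dict.empty)
      = (P.foldl (fun (d : PySem.Dict String (List String)) p => d.modify p.1 [] (fun l => l ++ [p.2])) PySem.Dict.empty,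
         P.foldl (fun (d : PySem.Dict String Int) p => d.modify p.2 0 (fun c => c + 1)) PySem.Dict.empty) :=
    PySem.List.foldl_prod_mk (fun (d : PySem.Dict String (List String)) p => d.modify p.1 [] (fun l => l ++ [p.2])) (fun (d : PySem.Dict String Int) p => d.modify p.2 0 (fun c => c + 1)) P PySem.Dict.empty PySem.Dict.empty
  rw [hprod]
  rw [PySem.List.foldl_append_singleton_eq_map]
  rw [List.nil_append]
  refine List.map_congr_left (fun i _ => ?_)
  -- A side: sum over reporter i's reportee list = countP over P
  rw [PySem.Dict.getD_foldl_modify_append]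
  simp only [PySem.Dict.getD_empty, List.nil_append, pvRc_eq]
  rw [PySem.List.foldl_add (g := fun e => if ((P.map (fun p => p.2)).count e : Int) ≥ k then (1:Int) else 0), zero_add]
  have hfun : (fun e : String => if ((P.map (fun p => p.2)).count e : Int) ≥ k then (1:Int) else 0)
      = fun e => if (decide (k ≤ ((P.map (fun p => p.2)).count e : Int))) = true then 1 else 0 := by
    funext e; simp [ge_iff_le]
  rw [hfun, PySem.List.sum_map_ite_one_zero]
  -- B side: mail counter lookup = countP over P
  rw [PySem.List.foldl_if_eq_foldl_filter (p := fun p : String × String => PySem.Set.contains B p.2)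
        (f := fun (mail : PySem.Dict String Int) p => mail.insert p.1 (mail.getD p.1 0 + 1))]
  rw [← List.foldl_map (f := fun p : String × String => p.1)
        (g := fun (d : PySem.Dict String Int) e => d.insert e (d.getD e 0 + 1)),
      PySem.Dict.getD_foldl_insert_add_one]
  simp only [PySem.Dict.getD_empty, zero_add]
  rw [List.count_eq_countP]
  simp only [List.countP_map, List.countP_filter]
  rw [Int.natCast_inj]
  refine List.countP_congr (fun p hp => ?_)
  have h2 : p.2 ∈ P.map (fun p => p.2) := List.mem_map_of_mem hp
  simp only [Function.comp, hB, hC, pvBanned_eq P k p.2 h2]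
  rw [Bool.and_comm]
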